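-- pv_equiv track=rewrite | github.com/OneRaise5385/PythonStudy | python课/Exreport/g第七章/1.py | Mai
-- ===== SOURCE A (Python) =====
-- def Mai(ping,gai,shui):
--     if gai<3 and ping<2:
--         return shui
--     else:
--         shui_new=ping//2+gai//3
--         ping=ping%2+shui_new
--         gai=gai%3+shui_new
--         shui=shui+shui_new
--         return Mai(ping,gai,shui)
-- ===== SOURCE B (Python) =====
-- def Mai(ping, gai, shui):
--     # Loop only over the (bottles, caps) state; water drunk is recovered at the
--     # end from the conservation law: 3*ping + 2*gai + shui is invariant.
--     p, g = ping, gai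
--     while p >= 2 or g >= 3:
--         d = p // 2 + g // 3
--         p, g = p % 2 + d, g % 3 + d
--     return shui + (3 * ping + 2 * gai) - (3 * p + 2 * g)
-- ===== Notes on version B (the rewrite author's own statement) =====
-- stated objective: alternative
-- what changed: B drops the water accumulator entirely: it iterates only the (bottle, cap) pair to its fixed point and recovers the drunk water from the conservation law 3*ping+2*gai+shui = const, instead of A's tail recursion threading shui through every call.
import Mathlib
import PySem

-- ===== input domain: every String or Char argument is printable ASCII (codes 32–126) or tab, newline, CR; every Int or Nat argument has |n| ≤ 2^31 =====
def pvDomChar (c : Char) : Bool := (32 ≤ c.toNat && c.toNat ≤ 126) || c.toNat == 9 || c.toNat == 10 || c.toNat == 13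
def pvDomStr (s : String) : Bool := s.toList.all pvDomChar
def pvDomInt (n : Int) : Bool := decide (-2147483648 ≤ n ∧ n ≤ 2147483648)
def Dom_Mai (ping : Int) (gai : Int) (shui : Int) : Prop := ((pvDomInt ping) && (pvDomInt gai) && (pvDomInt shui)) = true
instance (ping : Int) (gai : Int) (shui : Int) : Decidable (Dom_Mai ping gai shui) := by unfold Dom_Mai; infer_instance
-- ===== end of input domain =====

-- B drops the water accumulator: it iterates only the (bottle, cap) pair and recovers the water
-- from the conservation law 3*ping + 2*gai + shui = const; an alternative decomposition, same cost.
-- Both ports recurse on a fuel that only makes the recursion total: 3*ping + 2*gai + shui is invariant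
-- under a round and 3*ping + 2*gai drops by the amount drunk each round, so pvFuel bounds the rounds.
def pvFuel (ping : Int) (gai : Int) : Nat := (3 * ping + 2 * gai).toNat + 2

-- ===== PORT A =====
-- A's tail recursion, step for step (the fuel is a totality guard only, see note above)
def MaiRec (fuel : Nat) (ping : Int) (gai : Int) (shui : Int) : Int :=
  match fuel with
  | 0 => shui
  | f + 1 =>
    if gai < 3 ∧ ping < 2 then
      shui
    else
      let shui_new := PySem.Int.floordiv ping 2 + PySem.Int.floordiv gai 3
      MaiRec f (PySem.Int.mod ping 2 + shui_new) (PySem.Int.mod gai 3 + shui_new) (shui + shui_new)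

def Mai (ping : Int) (gai : Int) (shui : Int) : Int := MaiRec (pvFuel ping gai) ping gai shui

-- ===== PORT B =====
-- Source B's while loop over the two-component state (p, g) only; shui is not threaded through it
def MaiPair (fuel : Nat) (p : Int) (g : Int) : Int × Int :=
  match fuel with
  | 0 => (p, g)
  | f + 1 =>
    if p ≥ 2 ∨ g ≥ 3 then
      let d := PySem.Int.floordiv p 2 + PySem.Int.floordiv g 3
      MaiPair f (PySem.Int.mod p 2 + d) (PySem.Int.mod g 3 + d)
    else (p, g)

-- the conservation-law read-off of Source B's return statement
def Mai_alt (ping : Int) (gai : Int) (shui : Int) : Int :=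
  let e := MaiPair (pvFuel ping gai) ping gai
  shui + (3 * ping + 2 * gai) - (3 * e.1 + 2 * e.2)

-- ===== PRECONDITION & SPEC =====
def Spec_Mai (ping : Int) (gai : Int) (shui : Int) (out : Int) : Prop := out = Mai_alt ping gai shui
instance (ping : Int) (gai : Int) (shui : Int) (out : Int) : Decidable (Spec_Mai ping gai shui out) := by unfold Spec_Mai; infer_instance

-- ===== CLAIM (what is proved, stated in full; the proofs are below) =====
def Claim_equal_Mai : Prop := ∀ (ping : Int) (gai : Int) (shui : Int), Dom_Mai ping gai shui → Spec_Mai ping gai shui (Mai ping gai shui)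

-- ===== LEMMAS AND PROOFS =====
-- Conservation law: A's accumulator equals shui plus the drop in 3*p + 2*g along B's pair trajectory.
theorem MaiRec_eq_pair (fuel : Nat) (p g s : Int) :
    MaiRec fuel p g s = s + (3 * p + 2 * g)
      - (3 * (MaiPair fuel p g).1 + 2 * (MaiPair fuel p g).2) := by
  induction fuel generalizing p g s with
  | zero => simp [MaiRec, MaiPair]
  | succ f ih =>
    simp only [MaiRec, MaiPair]
    by_cases h : g < 3 ∧ p < 2
    · have hg : ¬(p ≥ 2 ∨ g ≥ 3) := by omega
      simp [h.1, h.2, hg]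
    · have hg : p ≥ 2 ∨ g ≥ 3 := by omega
      simp only [h, if_false, hg, if_true]
      rw [ih]
      have hp := PySem.Int.floordiv_mul_add_mod p 2
      have hgq := PySem.Int.floordiv_mul_add_mod g 3
      ring_nf
      ring_nf at hp hgq
      omega

-- ===== VERDICT (by name: the statement is the Claim_ definition above) =====
theorem Mai_spec : Claim_equal_Mai := by
  intro ping gai shui _
  unfold Spec_Mai Mai_alt Mai
  exact MaiRec_eq_pair (pvFuel ping gai) ping gai shui
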